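-- pv_equiv track=rewrite | github.com/adedokuntoluwanimi/magnetics3 | backend/services/ai_service.py | _detect_truncation_signals
-- ===== SOURCE A (Python) =====
-- from typing import Any
--
-- def _detect_truncation_signals(text: str) -> dict[str, Any]:
--     candidate = (text or "").strip()
--     quote_count = 0
--     escaped = False
--     for char in candidate:
--         if escaped:
--             escaped = False
--             continue
--         if char == "\\":
--             escaped = True
--         elif char == '"':
--             quote_count += 1
--     return {
--         "missing_closing_brace": bool(candidate) and "{" in candidate and not candidate.endswith("}"),
--         "unmatched_quotes": quote_count % 2 == 1,
--         "unmatched_code_fence": candidate.count("```") % 2 == 1,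
--     }
-- ===== SOURCE B (Python) =====
-- def _detect_truncation_signals(text: str) -> dict:
--     candidate = (text or "").strip()
--     # A quote is unescaped iff the maximal run of backslashes immediately
--     # before it has even length; judge each quote locally by backward lookback
--     # instead of carrying an escape flag through the string.
--     quotes = 0
--     for i, ch in enumerate(candidate):
--         if ch == '"':
--             j = i
--             while j > 0 and candidate[j - 1] == "\\":
--                 j -= 1
--             if (i - j) % 2 == 0:
--                 quotes += 1
--     return {
--         "missing_closing_brace": bool(candidate) and "{" in candidate and not candidate.endswith("}"),
--         "unmatched_quotes": quotes % 2 == 1,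
--         "unmatched_code_fence": candidate.count("```") % 2 == 1,
--     }
-- ===== Notes on version B (the rewrite author's own statement) =====
-- stated objective: alternative
-- what changed: Replaces the sequential escaped-flag state machine with a stateless per-quote rule: each quote is counted iff the maximal backslash run immediately preceding it has even length, found by a local backward lookback; the two glue fields are kept verbatim.
import Mathlib
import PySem

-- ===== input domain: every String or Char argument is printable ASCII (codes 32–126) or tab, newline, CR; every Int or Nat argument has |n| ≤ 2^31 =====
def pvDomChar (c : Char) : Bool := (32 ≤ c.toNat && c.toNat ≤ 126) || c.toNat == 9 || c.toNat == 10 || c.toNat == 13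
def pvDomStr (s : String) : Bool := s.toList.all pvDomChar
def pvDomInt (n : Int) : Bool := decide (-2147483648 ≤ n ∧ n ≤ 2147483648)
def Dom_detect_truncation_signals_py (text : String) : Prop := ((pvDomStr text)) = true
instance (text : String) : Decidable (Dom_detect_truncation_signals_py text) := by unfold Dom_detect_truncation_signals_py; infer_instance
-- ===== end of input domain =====

-- B replaces A's escaped-flag state machine by a stateless per-quote rule (count a quote iff the
-- backslash run right before it has even length); objective: alternative, same cost.

-- ===== PORT A =====
-- the for-loop over candidate with the `escaped` flag and `quote_count`
def pvALoop : List Char → Bool → Int → Int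
  | [], _, q => q
  | _ :: rest, true, q => pvALoop rest false q
  | c :: rest, false, q =>
    if c = '\\' then pvALoop rest true q
    else if c = '"' then pvALoop rest false (q + 1)
    else pvALoop rest false q

def detect_truncation_signals_py (text : String) : List (String × Bool) :=
  let candidate := PySem.Str.strip (if text == "" then "" else text)
  let quote_count := pvALoop candidate.toList false 0
  [("missing_closing_brace", (!(candidate == "")) && PySem.Str.isIn "{" candidate && (!(PySem.Str.endswith candidate "}"))),
   ("unmatched_quotes", PySem.Int.mod quote_count 2 == 1),
   ("unmatched_code_fence", PySem.Str.count candidate "```" % 2 == 1)]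

-- ===== PORT B =====
-- the inner while-loop of Source B: j starts at i and steps back over backslashes
def pvLookback (cs : List Char) : Nat → Nat
  | 0 => 0
  | j + 1 => if cs.getD j ' ' = '\\' then pvLookback cs j else j + 1

-- the for-loop over enumerate(candidate)
def pvBLoop (full : List Char) : List Char → Nat → Nat → Nat
  | [], _, acc => acc
  | ch :: rest, i, acc =>
      pvBLoop full rest (i + 1)
        (if ch = '"' then (if (i - pvLookback full i) % 2 == 0 then acc + 1 else acc) else acc)

def detect_truncation_signals_py_alt (text : String) : List (String × Bool) :=
  let candidate := PySem.Str.strip (if text == "" then "" else text)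
  let quotes := pvBLoop candidate.toList candidate.toList 0 0
  [("missing_closing_brace", (!(candidate == "")) && PySem.Str.isIn "{" candidate && (!(PySem.Str.endswith candidate "}"))),
   ("unmatched_quotes", quotes % 2 == 1),
   ("unmatched_code_fence", PySem.Str.count candidate "```" % 2 == 1)]

-- ===== PRECONDITION & SPEC =====
def Spec_detect_truncation_signals_py (text : String) (out : List (String × Bool)) : Prop := out = detect_truncation_signals_py_alt text
instance (text : String) (out : List (String × Bool)) : Decidable (Spec_detect_truncation_signals_py text out) := by unfold Spec_detect_truncation_signals_py; infer_instance

-- ===== CLAIM (what is proved, stated in full; the proofs are below) =====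
def Claim_equal_detect_truncation_signals_py : Prop := ∀ (text : String), Dom_detect_truncation_signals_py text → Spec_detect_truncation_signals_py text (detect_truncation_signals_py text)

-- ===== LEMMAS AND PROOFS =====

-- reference count: number of quotes in cs that are unescaped, given r = length of the
-- backslash run immediately before cs
def pvF : List Char → Nat → Nat
  | [], _ => 0
  | c :: rest, r =>
      (if c = '"' ∧ r % 2 = 0 then 1 else 0) + pvF rest (if c = '\\' then r + 1 else 0)

theorem pvF_parity (cs : List Char) : ∀ r₁ r₂ : Nat, r₁ % 2 = r₂ % 2 → pvF cs r₁ = pvF cs r₂ := by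
  induction cs with
  | nil => intro _ _ _; rfl
  | cons c rest ih =>
      intro r₁ r₂ h
      simp only [pvF, h]
      congr 1
      split_ifs with hb
      · exact ih _ _ (by omega)
      · rfl

theorem pvALoop_eq_F (cs : List Char) :
    ∀ (q : Int) (r : Nat), pvALoop cs (decide (r % 2 = 1)) q = q + (pvF cs r : Int) := by
  induction cs with
  | nil => intro q r; simp [pvALoop, pvF]
  | cons c rest ih =>
      intro q r
      by_cases hr : r % 2 = 1
      · -- escaped = true: char skipped
        rw [show (decide (r % 2 = 1)) = true by simp [hr]]
        rw [show pvALoop (c :: rest) true q = pvALoop rest false q from rfl]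
        have := ih q 0
        simp only [show (decide ((0:Nat) % 2 = 1)) = false by decide] at this
        rw [this]
        simp only [pvF]
        have h1 : ¬ (c = '"' ∧ r % 2 = 0) := by rintro ⟨_, h⟩; omega
        rw [if_neg h1]
        split_ifs with hb
        · rw [pvF_parity rest (r + 1) 0 (by omega)]; simp
        · simp
      · rw [show (decide (r % 2 = 1)) = false by simp [hr]]
        rw [show pvALoop (c :: rest) false q =
              (if c = '\\' then pvALoop rest true q
               else if c = '"' then pvALoop rest false (q + 1)
               else pvALoop rest false q) from rfl]
        simp only [pvF]
        by_cases hb : c = '\\'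
        · -- backslash: run grows, parity flips to odd
          have := ih q (r + 1)
          rw [show (decide ((r + 1) % 2 = 1)) = true by simp; omega] at this
          rw [if_pos hb, if_pos hb, this,
              if_neg (by rintro ⟨h, _⟩; subst hb; exact absurd h (by decide))]
          simp
        · rw [if_neg hb, if_neg hb]
          by_cases hq : c = '"'
          · have := ih (q + 1) 0
            simp only [show (decide ((0:Nat) % 2 = 1)) = false by decide] at this
            rw [if_pos hq, this, if_pos ⟨hq, by omega⟩]
            push_cast; ring
          · have := ih q 0
            simp only [show (decide ((0:Nat) % 2 = 1)) = false by decide] at this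
            rw [if_neg hq, this, if_neg (by rintro ⟨h, _⟩; exact hq h)]
            simp

theorem pvLookback_le (cs : List Char) : ∀ i, pvLookback cs i ≤ i := by
  intro i
  induction i with
  | zero => simp [pvLookback]
  | succ j ih => simp only [pvLookback]; split_ifs <;> omega

-- the run-length recurrence satisfied by the lookback
theorem pvRun_succ (cs : List Char) (i : Nat) :
    (i + 1) - pvLookback cs (i + 1) =
      if cs.getD i ' ' = '\\' then (i - pvLookback cs i) + 1 else 0 := by
  simp only [pvLookback]
  split_ifs with h
  · have := pvLookback_le cs i; omega
  · omega

theorem pvBLoop_eq_F (cs : List Char) :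
    ∀ (suffix : List Char) (i acc : Nat), cs.drop i = suffix →
      pvBLoop cs suffix i acc = acc + pvF suffix (i - pvLookback cs i) := by
  intro suffix
  induction suffix with
  | nil => intro i acc _; simp [pvBLoop, pvF]
  | cons c rest ih =>
      intro i acc hdrop
      have hget : cs.getD i ' ' = c := by
        have h0 : (cs.drop i)[0]? = some c := by simp [hdrop]
        rw [List.getElem?_drop] at h0
        simp only [Nat.add_zero] at h0
        simp [List.getD, h0]
      have hdrop' : cs.drop (i + 1) = rest := by
        have : cs.drop (i + 1) = (cs.drop i).drop 1 := by
          rw [List.drop_drop]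
        simp [this, hdrop]
      rw [show pvBLoop cs (c :: rest) i acc =
            pvBLoop cs rest (i + 1)
              (if c = '"' then (if (i - pvLookback cs i) % 2 == 0 then acc + 1 else acc) else acc)
            from rfl]
      rw [ih (i + 1) _ hdrop', pvRun_succ, hget]
      simp only [pvF]
      split_ifs with hq hc hp <;> simp_all <;> omega

theorem mod_two_beq (c : Nat) : (PySem.Int.mod ((c : Nat) : Int) 2 == 1) = (c % 2 == 1) := by
  rw [PySem.Int.mod_eq_emod_of_pos (by norm_num)]
  apply Bool.eq_iff_iff.mpr
  simp only [beq_iff_eq]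
  omega

-- ===== VERDICT (by name: the statement is the Claim_ definition above) =====
theorem detect_truncation_signals_py_spec : Claim_equal_detect_truncation_signals_py := by
  intro text _
  unfold Spec_detect_truncation_signals_py detect_truncation_signals_py detect_truncation_signals_py_alt
  have hA := pvALoop_eq_F (PySem.Str.strip (if text == "" then "" else text)).toList 0 0
  have hB := pvBLoop_eq_F (PySem.Str.strip (if text == "" then "" else text)).toList
      (PySem.Str.strip (if text == "" then "" else text)).toList 0 0 (by simp)
  simp only [show (decide ((0:Nat) % 2 = 1)) = false by decide] at hA
  simp only [show pvLookback (PySem.Str.strip (if text == "" then "" else text)).toList 0 = 0 from rfl] at hB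
  simp only [hA, hB, zero_add, Nat.sub_zero, mod_two_beq]
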